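-- pv_equiv track=rewrite | github.com/XinweiChai/leetcode_problems | python/problem649.py | predictPartyVictory2
-- ===== SOURCE A (Python) =====
-- from collections import deque
--
-- def predictPartyVictory2(senate):
--     n = len(senate)
--     R, D = deque(), deque()
--     for i in range(n):
--         if senate[i] == "D":
--             D.append(i)
--         else:
--             R.append(i)
--
--     while D and R:
--         if D[0] > R[0]:
--             R.append(R[0] + n)
--         else:
--             D.append(D[0] + n)
--
--         D.popleft()
--         R.popleft()
--
--     return "Dire" if D else "Radiant"
-- ===== SOURCE B (Python) =====
-- def predictPartyVictory2(senate):
--     # single queue of party characters with live counts, instead of two index deques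
--     q = list(senate)
--     d = sum(1 for c in q if c == "D")
--     r = len(q) - d
--     while d > 0 and r > 0:
--         c = q.pop(0)
--         if c == "D":
--             i = next(j for j, x in enumerate(q) if x != "D")
--             q.pop(i)
--             r -= 1
--         else:
--             i = next(j for j, x in enumerate(q) if x == "D")
--             q.pop(i)
--             d -= 1
--         q.append(c)
--     return "Dire" if d > 0 else "Radiant"
-- ===== Notes on version B (the rewrite author's own statement) =====
-- stated objective: alternative
-- what changed: Replaces the two integer-index deques (with the i+n re-enqueue trick) by a single queue of the party characters themselves plus live-count counters: the front senator bans the first opposing senator left in the queue and rotates to the back; no indices are ever stored.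
import Mathlib
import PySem

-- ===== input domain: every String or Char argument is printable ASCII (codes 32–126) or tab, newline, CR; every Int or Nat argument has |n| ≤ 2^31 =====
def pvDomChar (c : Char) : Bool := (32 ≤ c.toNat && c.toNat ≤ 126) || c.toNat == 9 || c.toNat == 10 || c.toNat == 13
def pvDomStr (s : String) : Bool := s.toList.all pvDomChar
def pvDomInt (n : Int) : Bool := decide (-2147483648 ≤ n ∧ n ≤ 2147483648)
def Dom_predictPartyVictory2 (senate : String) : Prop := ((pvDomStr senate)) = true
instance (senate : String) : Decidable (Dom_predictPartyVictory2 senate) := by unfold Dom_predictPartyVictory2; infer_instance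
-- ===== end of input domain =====

-- B replaces A's two index deques by a single queue of party characters with live counters
-- (alternative decomposition, not claimed faster); return values proved equal on all inputs.

-- ===== PORT A =====
-- the while loop: compare front indices; the earlier one re-enqueues its index + n, both fronts pop
def pvALoop (n : Int) : List Int → List Int → List Int × List Int
  | dq :: D, rq :: R =>
    if dq > rq then pvALoop n (dq :: D).tail (R ++ [rq + n])
    else pvALoop n (D ++ [dq + n]) (rq :: R).tail
  | D, R => (D, R)
termination_by D R => D.length + R.length
decreasing_by all_goals simp

def predictPartyVictory2 (senate : String) : String :=
  let cs := senate.toList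
  let n : Int := (cs.length : Int)
  -- for i in range(n): append i to D or R according to senate[i]
  let DR := cs.zipIdx.foldl
    (fun (s : List Int × List Int) ci =>
      if ci.1 == 'D' then (s.1 ++ [(ci.2 : Int)], s.2) else (s.1, s.2 ++ [(ci.2 : Int)]))
    ([], [])
  if (pvALoop n DR.1 DR.2).1 = [] then "Radiant" else "Dire"

-- ===== PORT B =====
-- q.pop(i) at the first element satisfying p (Python: next(...) over enumerate, then pop)
def pvRemoveFirst {α : Type} (p : α → Bool) : List α → List α
  | [] => []
  | x :: xs => if p x then xs else x :: pvRemoveFirst p xs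

-- the while loop of Source B: pop the front senator, remove the first opposing one, rotate, count down
def pvBLoop : List Char → Int → Int → Int × Int
  | q, d, r =>
    if d > 0 ∧ r > 0 then
      match q with
      | [] => (d, r)  -- unreachable when both counters are positive (totality guard)
      | c :: rest =>
        if c == 'D' then pvBLoop (pvRemoveFirst (fun x => x != 'D') rest ++ [c]) d (r - 1)
        else pvBLoop (pvRemoveFirst (fun x => x == 'D') rest ++ [c]) (d - 1) r
    else (d, r)
termination_by q d r => (d + r).toNat
decreasing_by all_goals omega

def predictPartyVictory2_alt (senate : String) : String :=
  let q := senate.toList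
  let d : Int := ((q.countP (fun c => c == 'D') : Nat) : Int)
  let r : Int := (q.length : Int) - d
  if (pvBLoop q d r).1 > 0 then "Dire" else "Radiant"

-- ===== PRECONDITION & SPEC =====
def Spec_predictPartyVictory2 (senate : String) (out : String) : Prop := out = predictPartyVictory2_alt senate
instance (senate : String) (out : String) : Decidable (Spec_predictPartyVictory2 senate out) := by unfold Spec_predictPartyVictory2; infer_instance

-- ===== CLAIM (what is proved, stated in full; the proofs are below) =====
def Claim_equal_predictPartyVictory2 : Prop := ∀ (senate : String), Dom_predictPartyVictory2 senate → Spec_predictPartyVictory2 senate (predictPartyVictory2 senate)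

-- ===== LEMMAS AND PROOFS =====

-- merge the two sorted index queues by value, recording which queue each entry came from
def pvMergeB : List Int → List Int → List Bool
  | [], R => R.map (fun _ => false)
  | _ :: D, [] => true :: pvMergeB D []
  | dq :: D, rq :: R =>
    if dq < rq then true :: pvMergeB D (rq :: R) else false :: pvMergeB (dq :: D) R
termination_by D R => D.length + R.length

lemma pvMergeB_length (D R : List Int) : (pvMergeB D R).length = D.length + R.length := by
  fun_induction pvMergeB D R <;> simp_all <;> omega

lemma pvRemoveFirst_map {α β : Type} (f : α → β) (p : α → Bool) (q : β → Bool)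
    (h : ∀ x, q (f x) = p x) (l : List α) :
    (pvRemoveFirst p l).map f = pvRemoveFirst q (l.map f) := by
  induction l with
  | nil => rfl
  | cons x xs ih => simp [pvRemoveFirst, h x]; split <;> simp [*]

lemma pvAppR (z : Int) (D R : List Int) (h : ∀ x ∈ D ++ R, x < z) :
    pvMergeB D (R ++ [z]) = pvMergeB D R ++ [false] := by
  fun_induction pvMergeB D R with
  | case1 R => simp [pvMergeB]
  | case2 d D ih =>
    have hd : d < z := h d (by simp)
    simp only [List.nil_append] at ih ⊢
    simp only [pvMergeB, hd, if_pos]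
    rw [ih (fun x hx => h x (by simp at hx ⊢; tauto))]
    simp
  | case3 d D r R hlt ih =>
    simp only [List.cons_append] at ih ⊢
    simp only [pvMergeB, hlt, if_pos]
    rw [ih (fun x hx => h x (by simp at hx ⊢; tauto))]
  | case4 d D r R hlt ih =>
    simp only [List.cons_append] at ih ⊢
    simp only [pvMergeB, hlt]
    rw [ih (fun x hx => h x (by simp at hx ⊢; tauto))]
    simp

lemma pvAppD (z : Int) (D R : List Int) (h : ∀ x ∈ D ++ R, x < z) :
    pvMergeB (D ++ [z]) R = pvMergeB D R ++ [true] := by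
  fun_induction pvMergeB D R with
  | case1 R =>
    induction R with
    | nil => simp [pvMergeB]
    | cons r R ihr =>
      have hr : r < z := h r (by simp)
      simp only [List.nil_append] at ihr
      simp only [List.nil_append, pvMergeB, not_lt.2 hr.le]
      rw [ihr (fun x hx => h x (by simp at hx ⊢; tauto))]
      simp [pvMergeB]
  | case2 d D ih =>
    simp only [List.cons_append] at ih ⊢
    simp only [pvMergeB]
    rw [ih (fun x hx => h x (by simp at hx ⊢; tauto))]
  | case3 d D r R hlt ih =>
    simp only [List.cons_append] at ih ⊢
    simp only [pvMergeB, hlt, if_pos]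
    rw [ih (fun x hx => h x (by simp at hx ⊢; tauto))]
  | case4 d D r R hlt ih =>
    simp only [List.cons_append] at ih ⊢
    simp only [pvMergeB, hlt]
    rw [ih (fun x hx => h x (by simp at hx ⊢; tauto))]
    simp

lemma pvMergeB_cons_r_small (r : Int) (D R : List Int) (h : ∀ x ∈ D, r < x) :
    pvMergeB D (r :: R) = false :: pvMergeB D R := by
  cases D with
  | nil => simp [pvMergeB]
  | cons d D => simp [pvMergeB, not_lt.2 (h d (by simp)).le]

lemma pvMergeB_cons_d_small (d : Int) (D R : List Int) (h : ∀ y ∈ R, d < y) :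
    pvMergeB (d :: D) R = true :: pvMergeB D R := by
  cases R with
  | nil => simp [pvMergeB]
  | cons r R => simp [pvMergeB, h r (by simp)]

-- removing the first D-entry of the merge removes exactly the head of the D queue
lemma pvEraseT (d : Int) (D R : List Int)
    (hD : ∀ x ∈ D, d < x) (hR : d ∉ R) :
    pvRemoveFirst (fun b => b) (pvMergeB (d :: D) R) = pvMergeB D R := by
  induction R with
  | nil => simp [pvMergeB, pvRemoveFirst]
  | cons r R ih =>
    have hdr : d ≠ r := by simp at hR; tauto
    by_cases hlt : d < r
    · simp [pvMergeB, hlt, pvRemoveFirst]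
    · have hrd : r < d := by omega
      simp only [pvMergeB, hlt, pvRemoveFirst, Bool.false_eq_true, if_false]
      rw [ih (by simp at hR; tauto)]
      rw [pvMergeB_cons_r_small r D R (fun x hx => lt_trans hrd (hD x hx))]

-- removing the first R-entry of the merge removes exactly the head of the R queue
lemma pvEraseF (r : Int) (D R : List Int)
    (hR : ∀ y ∈ R, r < y) (hD : r ∉ D) :
    pvRemoveFirst (fun b => !b) (pvMergeB D (r :: R)) = pvMergeB D R := by
  induction D with
  | nil => simp [pvMergeB, pvRemoveFirst]
  | cons d D ih =>
    have hdr : d ≠ r := by simp at hD; tauto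
    by_cases hlt : d < r
    · simp only [pvMergeB, hlt, if_pos, pvRemoveFirst, Bool.not_true, Bool.false_eq_true, if_false]
      rw [ih (by simp at hD; tauto)]
      rw [pvMergeB_cons_d_small d D R (fun y hy => lt_trans hlt (hR y hy))]
    · simp [pvMergeB, hlt, pvRemoveFirst]

-- the simulation: B's loop over the merged character queue tracks A's loop over the index queues
lemma pvSim (n : Int) : ∀ (m : Nat) (D R : List Int) (q : List Char),
    D.length + R.length = m →
    D.Pairwise (· < ·) → R.Pairwise (· < ·) →
    (∀ x ∈ D, x ∉ R) →
    (∀ x ∈ D ++ R, ∀ y ∈ D ++ R, y < x + n) →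
    q.map (fun c => c == 'D') = pvMergeB D R →
    (pvBLoop q (D.length : Int) (R.length : Int)).1 = ((pvALoop n D R).1.length : Int) := by
  intro m
  induction m with
  | zero =>
    intro D R q hm hD hR hdisj hwin hq
    have hD0 : D = [] := by cases D <;> simp_all
    have hR0 : R = [] := by cases R <;> simp_all
    subst hD0; subst hR0
    rw [pvBLoop.eq_def]; simp [pvALoop]
  | succ m ih =>
    intro D R q hm hD hR hdisj hwin hq
    cases D with
    | nil => rw [pvBLoop.eq_def]; simp [pvALoop]
    | cons dh D' =>
    cases R with
    | nil => rw [pvBLoop.eq_def]; simp [pvALoop]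
    | cons rh R' =>
    have hne : dh ≠ rh := by
      have h1 := hdisj dh (by simp); simp at h1; tauto
    have hqlen : q.length = (dh :: D').length + (rh :: R').length := by
      have h2 := congrArg List.length hq
      simpa [pvMergeB_length] using h2
    obtain ⟨c, rest, rfl⟩ : ∃ c rest, q = c :: rest := by
      cases q with
      | nil => simp at hqlen
      | cons c rest => exact ⟨c, rest, rfl⟩
    have hcond : ((dh :: D').length : Int) > 0 ∧ ((rh :: R').length : Int) > 0 := by
      constructor <;> simp
    by_cases hlt : dh < rh
    · -- D's head acts first: it bans rh and re-enters as dh + n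
      have hmerge : pvMergeB (dh :: D') (rh :: R') = true :: pvMergeB D' (rh :: R') := by
        simp [pvMergeB, hlt]
      rw [hmerge, List.map_cons] at hq
      have hc : (c == 'D') = true := (List.cons.inj hq).1
      have hrest : rest.map (fun c => c == 'D') = pvMergeB D' (rh :: R') := (List.cons.inj hq).2
      have hgt : ∀ x ∈ D' ++ R', dh < x := by
        intro x hx
        rcases List.mem_append.1 hx with h | h
        · exact (List.pairwise_cons.1 hD).1 x h
        · exact lt_trans hlt ((List.pairwise_cons.1 hR).1 x h)
      have hlow : ∀ y ∈ (dh :: D') ++ (rh :: R'), y < dh + n :=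
        fun y hy => hwin dh (by simp) y hy
      have hndh : ∀ x ∈ D' ++ R', x < dh + n := by
        intro x hx
        rcases List.mem_append.1 hx with h | h
        · exact hlow x (by simp [h])
        · exact hlow x (by simp [h])
      have hrhD : rh ∉ D' := by
        intro hmem
        have h3 := hdisj rh (by simp [hmem])
        simp at h3
      -- one step of B
      rw [pvBLoop, if_pos hcond]
      simp only [hc, if_pos]
      -- one step of A
      rw [pvALoop]
      rw [if_neg (by omega : ¬ dh > rh)]
      simp only [List.tail_cons]
      -- the new state satisfies the relation
      have hmap : (pvRemoveFirst (fun x => x != 'D') rest ++ [c]).map (fun c => c == 'D')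
          = pvMergeB (D' ++ [dh + n]) R' := by
        rw [List.map_append]
        rw [pvRemoveFirst_map (fun c => c == 'D') (fun x => x != 'D') (fun b => !b)
          (by intro x; simp [bne]) rest]
        rw [hrest]
        rw [pvEraseF rh D' R' (fun y hy => (List.pairwise_cons.1 hR).1 y hy) hrhD]
        rw [pvAppD (dh + n) D' R' hndh]
        simp [hc]
      have hres := ih (D' ++ [dh + n]) R' (pvRemoveFirst (fun x => x != 'D') rest ++ [c])
        (by simp at hm ⊢; omega)
        (by
          rw [List.pairwise_append]
          refine ⟨(List.pairwise_cons.1 hD).2, by simp, ?_⟩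
          intro a ha b hb
          simp at hb; subst hb
          exact hndh a (by simp [ha]))
        ((List.pairwise_cons.1 hR).2)
        (by
          intro x hx
          rcases List.mem_append.1 hx with h | h
          · intro hmem
            have h4 := hdisj x (by simp [h])
            simp at h4; tauto
          · simp at h; subst h
            intro hmem
            exact absurd (hndh (dh + n) (by simp [hmem])) (by omega))
        (by
          intro x hx y hy
          have hx' : x ∈ D' ++ R' ∨ x = dh + n := by
            simp at hx ⊢; tauto
          have hy' : y ∈ D' ++ R' ∨ y = dh + n := by
            simp at hy ⊢; tauto
          have hposn : (0:Int) < n := by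
            have h5 := hwin dh (by simp) dh (by simp); omega
          rcases hx' with hx' | hx' <;> rcases hy' with hy' | hy'
          · have h6 : x ∈ (dh :: D') ++ (rh :: R') := by simp at hx' ⊢; tauto
            have h7 : y ∈ (dh :: D') ++ (rh :: R') := by simp at hy' ⊢; tauto
            exact hwin x h6 y h7
          · subst hy'; have := hgt x hx'; omega
          · subst hx'; have := hndh y hy'; omega
          · subst hx'; subst hy'; omega)
        hmap
      -- line up the integer counters
      have e1 : ((D' ++ [dh + n]).length : Int) = ((dh :: D').length : Int) := by
        simp
      have e2 : ((R').length : Int) = ((rh :: R').length : Int) - 1 := by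
        simp
      rw [e1, e2] at hres
      exact hres
    · -- R's head acts first: it bans dh and re-enters as rh + n
      have hrd : rh < dh := by
        rcases lt_trichotomy rh dh with h | h | h
        · exact h
        · exact absurd h.symm hne
        · exact absurd h hlt
      have hmerge : pvMergeB (dh :: D') (rh :: R') = false :: pvMergeB (dh :: D') R' := by
        simp [pvMergeB, hlt]
      rw [hmerge, List.map_cons] at hq
      have hc : (c == 'D') = false := by
        have h8 := (List.cons.inj hq).1; simpa using h8
      have hrest : rest.map (fun c => c == 'D') = pvMergeB (dh :: D') R' := (List.cons.inj hq).2
      have hgt : ∀ x ∈ D' ++ R', rh < x := by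
        intro x hx
        rcases List.mem_append.1 hx with h | h
        · exact lt_trans hrd ((List.pairwise_cons.1 hD).1 x h)
        · exact (List.pairwise_cons.1 hR).1 x h
      have hlow : ∀ y ∈ (dh :: D') ++ (rh :: R'), y < rh + n :=
        fun y hy => hwin rh (by simp) y hy
      have hnrh : ∀ x ∈ D' ++ R', x < rh + n := by
        intro x hx
        rcases List.mem_append.1 hx with h | h
        · exact hlow x (by simp [h])
        · exact hlow x (by simp [h])
      have hdhR : dh ∉ R' := by
        intro hmem
        have h3 := hdisj dh (by simp)
        simp at h3; tauto
      -- one step of B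
      rw [pvBLoop.eq_def]
      simp only [if_pos hcond, hc, Bool.false_eq_true, if_false]
      -- one step of A
      rw [pvALoop]
      rw [if_pos (by omega : dh > rh)]
      simp only [List.tail_cons]
      -- the new state satisfies the relation
      have hmap : (pvRemoveFirst (fun x => x == 'D') rest ++ [c]).map (fun c => c == 'D')
          = pvMergeB D' (R' ++ [rh + n]) := by
        rw [List.map_append]
        rw [pvRemoveFirst_map (fun c => c == 'D') (fun x => x == 'D') (fun b => b)
          (by intro x; rfl) rest]
        rw [hrest]
        rw [pvEraseT dh D' R' (fun x hx => (List.pairwise_cons.1 hD).1 x hx) hdhR]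
        rw [pvAppR (rh + n) D' R' hnrh]
        simp [hc]
      have hres := ih D' (R' ++ [rh + n]) (pvRemoveFirst (fun x => x == 'D') rest ++ [c])
        (by simp at hm ⊢; omega)
        ((List.pairwise_cons.1 hD).2)
        (by
          rw [List.pairwise_append]
          refine ⟨(List.pairwise_cons.1 hR).2, by simp, ?_⟩
          intro a ha b hb
          simp at hb; subst hb
          exact hnrh a (by simp [ha]))
        (by
          intro x hx
          intro hmem
          rcases List.mem_append.1 hmem with h | h
          · have h4 := hdisj x (by simp [hx])
            simp at h4; tauto
          · simp at h
            exact absurd (hnrh x (by simp [hx])) (by omega))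
        (by
          intro x hx y hy
          have hx' : x ∈ D' ++ R' ∨ x = rh + n := by
            simp at hx ⊢; tauto
          have hy' : y ∈ D' ++ R' ∨ y = rh + n := by
            simp at hy ⊢; tauto
          have hposn : (0:Int) < n := by
            have h5 := hwin rh (by simp) rh (by simp); omega
          rcases hx' with hx' | hx' <;> rcases hy' with hy' | hy'
          · have h6 : x ∈ (dh :: D') ++ (rh :: R') := by simp at hx' ⊢; tauto
            have h7 : y ∈ (dh :: D') ++ (rh :: R') := by simp at hy' ⊢; tauto
            exact hwin x h6 y h7
          · subst hy'; have := hgt x hx'; omega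
          · subst hx'; have := hnrh y hy'; omega
          · subst hx'; subst hy'; omega)
        hmap
      -- line up the integer counters
      have e1 : ((D').length : Int) = ((dh :: D').length : Int) - 1 := by
        simp
      have e2 : ((R' ++ [rh + n]).length : Int) = ((rh :: R').length : Int) := by
        simp
      rw [e1, e2] at hres
      exact hres

-- the building fold produces sorted, bounded, disjoint queues merging back to the char sequence
def pvFoldDR (l : List (Char × Nat)) (s : List Int × List Int) : List Int × List Int :=
  l.foldl
    (fun (s : List Int × List Int) ci =>
      if ci.1 == 'D' then (s.1 ++ [(ci.2 : Int)], s.2) else (s.1, s.2 ++ [(ci.2 : Int)]))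
    s

lemma pvBuildGo : ∀ (l : List Char) (k : Nat) (D R : List Int),
    D.Pairwise (· < ·) → R.Pairwise (· < ·) →
    (∀ x ∈ D ++ R, 0 ≤ x ∧ x < (k : Int)) →
    (∀ x ∈ D, x ∉ R) →
    (pvFoldDR (l.zipIdx k) (D, R)).1.Pairwise (· < ·) ∧
    (pvFoldDR (l.zipIdx k) (D, R)).2.Pairwise (· < ·) ∧
    (∀ x ∈ (pvFoldDR (l.zipIdx k) (D, R)).1 ++ (pvFoldDR (l.zipIdx k) (D, R)).2,
      0 ≤ x ∧ x < ((k + l.length : Nat) : Int)) ∧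
    (∀ x ∈ (pvFoldDR (l.zipIdx k) (D, R)).1, x ∉ (pvFoldDR (l.zipIdx k) (D, R)).2) ∧
    pvMergeB (pvFoldDR (l.zipIdx k) (D, R)).1 (pvFoldDR (l.zipIdx k) (D, R)).2
      = pvMergeB D R ++ l.map (fun c => c == 'D') ∧
    (pvFoldDR (l.zipIdx k) (D, R)).1.length = D.length + l.countP (fun c => c == 'D') ∧
    (pvFoldDR (l.zipIdx k) (D, R)).1.length + (pvFoldDR (l.zipIdx k) (D, R)).2.length
      = D.length + R.length + l.length := by
  intro l
  induction l with
  | nil =>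
    intro k D R hD hR hb hdisj
    refine ⟨hD, hR, ?_, hdisj, by simp [pvFoldDR], by simp [pvFoldDR], by simp [pvFoldDR]⟩
    intro x hx
    have := hb x hx
    constructor
    · exact this.1
    · push_cast; omega
  | cons c l ihl =>
    intro k D R hD hR hb hdisj
    have hlt : ∀ x ∈ D ++ R, x < (k : Int) := fun x hx => (hb x hx).2
    rw [List.zipIdx_cons]
    cases hc : (c == 'D') with
    | true =>
      have hstep : pvFoldDR ((c, k) :: l.zipIdx (k + 1)) (D, R)
          = pvFoldDR (l.zipIdx (k + 1)) (D ++ [(k : Int)], R) := by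
        show pvFoldDR (l.zipIdx (k + 1)) (if (c == 'D') then _ else _) = _
        rw [hc]
        simp
      rw [hstep]
      have hres := ihl (k + 1) (D ++ [(k : Int)]) R
        (by
          rw [List.pairwise_append]
          refine ⟨hD, by simp, ?_⟩
          intro a ha b hb'
          simp at hb'; subst hb'
          exact hlt a (by simp [ha]))
        hR
        (by
          intro x hx
          rcases List.mem_append.1 hx with h | h
          · rcases List.mem_append.1 h with h' | h'
            · have := hb x (by simp [h']); push_cast; constructor <;> omega
            · simp at h'; subst h'; push_cast; constructor <;> omega
          · have := hb x (by simp [h]); push_cast; constructor <;> omega)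
        (by
          intro x hx
          rcases List.mem_append.1 hx with h | h
          · exact hdisj x h
          · simp at h; subst h
            intro hmem
            have := hlt _ (List.mem_append.2 (Or.inr hmem))
            omega)
      refine ⟨hres.1, hres.2.1, ?_, hres.2.2.2.1, ?_, ?_, ?_⟩
      · intro x hx
        have := hres.2.2.1 x hx
        push_cast at this ⊢; constructor
        · exact this.1
        · simp at this ⊢; omega
      · rw [hres.2.2.2.2.1, pvAppD (k : Int) D R hlt]
        simp [hc]
      · rw [hres.2.2.2.2.2.1]
        simp [hc]
        omega
      · have := hres.2.2.2.2.2.2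
        simp at this ⊢
        omega
    | false =>
      have hstep : pvFoldDR ((c, k) :: l.zipIdx (k + 1)) (D, R)
          = pvFoldDR (l.zipIdx (k + 1)) (D, R ++ [(k : Int)]) := by
        show pvFoldDR (l.zipIdx (k + 1)) (if (c == 'D') then _ else _) = _
        rw [hc]
        simp
      rw [hstep]
      have hres := ihl (k + 1) D (R ++ [(k : Int)])
        hD
        (by
          rw [List.pairwise_append]
          refine ⟨hR, by simp, ?_⟩
          intro a ha b hb'
          simp at hb'; subst hb'
          exact hlt a (by simp [ha]))
        (by
          intro x hx
          rcases List.mem_append.1 hx with h | h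
          · have := hb x (by simp [h]); push_cast; constructor <;> omega
          · rcases List.mem_append.1 h with h' | h'
            · have := hb x (by simp [h']); push_cast; constructor <;> omega
            · simp at h'; subst h'; push_cast; constructor <;> omega)
        (by
          intro x hx hmem
          rcases List.mem_append.1 hmem with h | h
          · exact hdisj x hx h
          · simp at h
            have := hlt x (List.mem_append.2 (Or.inl hx))
            omega)
      refine ⟨hres.1, hres.2.1, ?_, hres.2.2.2.1, ?_, ?_, ?_⟩
      · intro x hx
        have := hres.2.2.1 x hx
        push_cast at this ⊢; constructor
        · exact this.1
        · simp at this ⊢; omega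
      · rw [hres.2.2.2.2.1, pvAppR (k : Int) D R hlt]
        simp [hc]
      · rw [hres.2.2.2.2.2.1]
        simp [hc]
      · have := hres.2.2.2.2.2.2
        simp at this ⊢
        omega

-- ===== VERDICT (by name: the statement is the Claim_ definition above) =====
theorem predictPartyVictory2_spec : Claim_equal_predictPartyVictory2 := by
  intro senate _
  show predictPartyVictory2 senate = predictPartyVictory2_alt senate
  unfold predictPartyVictory2 predictPartyVictory2_alt
  simp only []
  have hb := pvBuildGo senate.toList 0 [] [] (by simp) (by simp) (by simp) (by simp)
  have hDR : senate.toList.zipIdx.foldl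
      (fun (s : List Int × List Int) ci =>
        if ci.1 == 'D' then (s.1 ++ [(ci.2 : Int)], s.2) else (s.1, s.2 ++ [(ci.2 : Int)]))
      ([], []) = pvFoldDR (senate.toList.zipIdx 0) ([], []) := rfl
  rw [hDR]
  obtain ⟨h1, h2, h3, h4, h5, h6, h7⟩ := hb
  have hmerge : senate.toList.map (fun c => c == 'D')
      = pvMergeB (pvFoldDR (senate.toList.zipIdx 0) ([], [])).1
                 (pvFoldDR (senate.toList.zipIdx 0) ([], [])).2 := by
    rw [h5]; simp [pvMergeB]
  have hwin : ∀ x ∈ (pvFoldDR (senate.toList.zipIdx 0) ([], [])).1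
        ++ (pvFoldDR (senate.toList.zipIdx 0) ([], [])).2,
      ∀ y ∈ (pvFoldDR (senate.toList.zipIdx 0) ([], [])).1
        ++ (pvFoldDR (senate.toList.zipIdx 0) ([], [])).2,
      y < x + (senate.toList.length : Int) := by
    intro x hx y hy
    have hxb := h3 x hx
    have hyb := h3 y hy
    simp only [Nat.zero_add] at hxb hyb
    omega
  have hsim := pvSim (senate.toList.length : Int)
    ((pvFoldDR (senate.toList.zipIdx 0) ([], [])).1.length
      + (pvFoldDR (senate.toList.zipIdx 0) ([], [])).2.length)
    (pvFoldDR (senate.toList.zipIdx 0) ([], [])).1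
    (pvFoldDR (senate.toList.zipIdx 0) ([], [])).2
    senate.toList rfl h1 h2 h4 hwin hmerge
  have hd : ((senate.toList.countP (fun c => c == 'D') : Nat) : Int)
      = ((pvFoldDR (senate.toList.zipIdx 0) ([], [])).1.length : Int) := by
    simp only [List.length_nil, Nat.zero_add] at h6
    omega
  rw [hd]
  have hr : (senate.toList.length : Int) - ((pvFoldDR (senate.toList.zipIdx 0) ([], [])).1.length : Int)
      = ((pvFoldDR (senate.toList.zipIdx 0) ([], [])).2.length : Int) := by
    simp only [List.length_nil, Nat.zero_add] at h7
    omega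
  rw [hr, hsim]
  by_cases hz : (pvALoop (senate.toList.length : Int)
      (pvFoldDR (senate.toList.zipIdx 0) ([], [])).1
      (pvFoldDR (senate.toList.zipIdx 0) ([], [])).2).1 = []
  · rw [if_pos hz, hz]
    simp
  · rw [if_neg hz]
    have : (pvALoop (senate.toList.length : Int)
        (pvFoldDR (senate.toList.zipIdx 0) ([], [])).1
        (pvFoldDR (senate.toList.zipIdx 0) ([], [])).2).1.length ≠ 0 := by
      simpa [List.length_eq_zero_iff] using hz
    rw [if_pos (by omega)]
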